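-- pv_equiv track=rewrite | github.com/als00als/Smart-Warehouse-Shipment-Delay-Prediction-AI-Competition | create_nb_5fold_weight_presets.py | _to_source_lines
-- ===== SOURCE A (Python) =====
-- def _to_source_lines(text: str):
--     lines = text.split("\n")
--     if not lines:
--         return []
--     out = [f"{line}\n" for line in lines[:-1]]
--     if lines[-1]:
--         out.append(lines[-1])
--     return out
-- ===== SOURCE B (Python) =====
-- def _to_source_lines(text: str):
--     out = []
--     cur = []
--     for ch in text:
--         cur.append(ch)
--         if ch == "\n":
--             out.append("".join(cur))
--             cur = []
--     if cur:
--         out.append("".join(cur))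
--     return out
-- ===== Notes on version B (the rewrite author's own statement) =====
-- stated objective: alternative
-- what changed: Replaces split-on-newline followed by re-appending the separator to every piece but the last with a single left-to-right character scan that emits each newline-terminated line as soon as its terminator is seen, keeping only the current line buffer.
import Mathlib
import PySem

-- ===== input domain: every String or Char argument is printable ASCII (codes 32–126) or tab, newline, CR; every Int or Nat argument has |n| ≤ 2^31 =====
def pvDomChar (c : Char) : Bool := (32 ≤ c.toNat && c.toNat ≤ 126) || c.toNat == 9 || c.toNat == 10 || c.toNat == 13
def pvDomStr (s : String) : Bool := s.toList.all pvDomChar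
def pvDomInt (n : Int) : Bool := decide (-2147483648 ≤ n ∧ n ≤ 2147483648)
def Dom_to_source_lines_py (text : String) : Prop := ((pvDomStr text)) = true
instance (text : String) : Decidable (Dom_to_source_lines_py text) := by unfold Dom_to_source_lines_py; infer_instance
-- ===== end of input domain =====

-- B replaces split-then-rebuild with a single character scan emitting each newline-terminated line as it is completed (alternative decomposition, same O(n) cost).

-- ===== PORT A =====
def to_source_lines_py (text : String) : List String :=
  let lines : List String := (PySem.Chars.splitOn text.toList "\n".toList).map String.ofList
  if lines.isEmpty then []
  else
    let out := (PySem.List.slice lines none (some (-1))).map (fun line => line ++ "\n")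
    match PySem.List.pyGet? lines (-1) with
    | some last => if last ≠ "" then out ++ [last] else out
    | none => out

-- ===== PORT B =====
def to_source_lines_py_alt (text : String) : List String :=
  let r := text.toList.foldl (fun (st : List String × List Char) ch =>
    let cur := st.2 ++ [ch]
    if ch = '\n' then (st.1 ++ [String.ofList cur], ([] : List Char)) else (st.1, cur)) ([], [])
  if r.2.isEmpty then r.1 else r.1 ++ [String.ofList r.2]

-- ===== PRECONDITION & SPEC =====
def Spec_to_source_lines_py (text : String) (out : List String) : Prop := out = to_source_lines_py_alt text
instance (text : String) (out : List String) : Decidable (Spec_to_source_lines_py text out) := by unfold Spec_to_source_lines_py; infer_instance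

-- ===== CLAIM (what is proved, stated in full; the proofs are below) =====
def Claim_equal_to_source_lines_py : Prop := ∀ (text : String), Dom_to_source_lines_py text → Spec_to_source_lines_py text (to_source_lines_py text)

-- ===== LEMMAS AND PROOFS =====

/-- Reference splitter: split a char list on '\n' (never returns []). -/
def spNl : List Char → List (List Char)
  | [] => [[]]
  | c :: rest => if c = '\n' then [] :: spNl rest
      else match spNl rest with
        | [] => [[c]]
        | p :: ps => (c :: p) :: ps

/-- Reference output builder shared by both sides. -/
def gNl : List (List Char) → List String
  | [] => []
  | [p] => if p.isEmpty then [] else [String.ofList p]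
  | p :: q :: ps => String.ofList (p ++ ['\n']) :: gNl (q :: ps)

theorem spNl_ne_nil (cs : List Char) : spNl cs ≠ [] := by
  cases cs with
  | nil => simp [spNl]
  | cons c rest =>
    simp only [spNl]
    split
    · simp
    · split <;> simp_all

theorem spNl_cons_head_tail (cs : List Char) :
    (spNl cs).headI :: (spNl cs).tail = spNl cs := by
  cases h : spNl cs with
  | nil => exact absurd h (spNl_ne_nil cs)
  | cons p ps => simp

theorem splitOn_go_eq (fuel : Nat) : ∀ (l cur : List Char) (accs : List (List Char)),
    l.length < fuel →
    PySem.Chars.splitOn.go ['\n'] fuel l cur accs =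
      accs.reverse ++ ((cur.reverse ++ (spNl l).headI) :: (spNl l).tail) := by
  induction fuel with
  | zero => intro l cur accs h; omega
  | succ f ih =>
    intro l cur accs h
    cases l with
    | nil =>
      rw [PySem.Chars.splitOn.go.eq_2 ['\n'] (f+1) cur accs (by omega)]
      simp [spNl]
    | cons c rest =>
      rw [PySem.Chars.splitOn.go.eq_3]
      by_cases hc : c = '\n'
      · subst hc
        rw [if_pos (by simp [List.isPrefixOf])]
        simp only [List.length_cons, List.length_nil, List.drop_succ_cons, List.drop_zero]
        rw [ih rest [] (cur.reverse :: accs) (by simp at h ⊢; omega)]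
        cases hs : spNl rest with
        | nil => exact absurd hs (spNl_ne_nil rest)
        | cons p ps => simp [spNl, hs]
      · rw [if_neg (by simp [List.isPrefixOf]; exact fun hx => absurd hx.symm hc)]
        rw [ih rest (c :: cur) accs (by simp at h ⊢; omega)]
        cases hs : spNl rest with
        | nil => exact absurd hs (spNl_ne_nil rest)
        | cons p ps => simp [spNl, hc, hs]

theorem splitOn_eq_spNl (cs : List Char) :
    PySem.Chars.splitOn cs ['\n'] = spNl cs := by
  unfold PySem.Chars.splitOn
  rw [splitOn_go_eq (cs.length + 1) cs [] [] (by omega)]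
  simpa using (spNl_cons_head_tail cs)

theorem ofList_append_nl (p : List Char) : String.ofList p ++ "\n" = String.ofList (p ++ ['\n']) := by
  simp

theorem g_eq_build (L : List (List Char)) (hL : L ≠ []) :
    ((L.map String.ofList).dropLast.map (fun s => s ++ "\n")) ++
      (match (L.map String.ofList).getLast? with
       | some last => if last ≠ "" then [last] else []
       | none => []) = gNl L := by
  induction L with
  | nil => exact absurd rfl hL
  | cons p ps ih =>
    cases ps with
    | nil =>
      simp only [List.map_cons, List.map_nil, gNl]
      by_cases hp : p = [] <;> simp [hp]
    | cons q qs =>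
      simp only [List.map_cons, gNl]
      rw [List.dropLast_cons_of_ne_nil (by simp), List.getLast?_cons_cons]
      rw [← ih (by simp)]
      simp only [List.map_cons, List.cons_append, ofList_append_nl]

theorem A_eq_g (text : String) : to_source_lines_py text = gNl (spNl text.toList) := by
  unfold to_source_lines_py
  have h1 : ("\n".toList) = ['\n'] := by decide
  rw [h1, splitOn_eq_spNl]
  have hne : (spNl text.toList).map String.ofList ≠ [] := by
    simp [spNl_ne_nil]
  rw [if_neg (by simpa using hne)]
  rw [PySem.List.slice_to_neg_one, PySem.List.pyGet?_neg_one]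
  rw [← g_eq_build (spNl text.toList) (spNl_ne_nil _)]
  cases hL : ((spNl text.toList).map String.ofList).getLast? with
  | none => simp_all
  | some last => by_cases h : last = "" <;> simp [h]

/-- The scan step of B's loop, named for the proofs. -/
def stepB (st : List String × List Char) (ch : Char) : List String × List Char :=
  if ch = '\n' then (st.1 ++ [String.ofList (st.2 ++ [ch])], ([] : List Char)) else (st.1, st.2 ++ [ch])

theorem stepB_lambda : (fun (st : List String × List Char) ch =>
    let cur := st.2 ++ [ch]
    if ch = '\n' then (st.1 ++ [String.ofList cur], ([] : List Char)) else (st.1, cur)) = stepB := by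
  funext st ch; simp [stepB]

theorem foldB_eq (cs : List Char) : ∀ (out : List String) (cur : List Char),
    (if (cs.foldl stepB (out, cur)).2.isEmpty then (cs.foldl stepB (out, cur)).1
     else (cs.foldl stepB (out, cur)).1 ++ [String.ofList (cs.foldl stepB (out, cur)).2])
    = out ++ gNl ((cur ++ (spNl cs).headI) :: (spNl cs).tail) := by
  induction cs with
  | nil =>
    intro out cur
    by_cases hc : cur = [] <;> simp [spNl, gNl, hc]
  | cons c rest ih =>
    intro out cur
    by_cases hc : c = '\n'
    · subst hc
      rw [List.foldl_cons, show stepB (out, cur) '\n' = (out ++ [String.ofList (cur ++ ['\n'])], []) from by simp [stepB]]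
      rw [ih (out ++ [String.ofList (cur ++ ['\n'])]) []]
      cases hs : spNl rest with
      | nil => exact absurd hs (spNl_ne_nil rest)
      | cons p ps => simp [spNl, hs, gNl]
    · rw [List.foldl_cons, show stepB (out, cur) c = (out, cur ++ [c]) from by simp [stepB, hc]]
      rw [ih out (cur ++ [c])]
      cases hs : spNl rest with
      | nil => exact absurd hs (spNl_ne_nil rest)
      | cons p ps => simp [spNl, hc, hs]

theorem B_eq_g (text : String) : to_source_lines_py_alt text = gNl (spNl text.toList) := by
  unfold to_source_lines_py_alt
  simp only [stepB_lambda]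
  rw [foldB_eq text.toList [] []]
  cases hs : spNl text.toList with
  | nil => exact absurd hs (spNl_ne_nil _)
  | cons p ps => simp

-- ===== VERDICT (by name: the statement is the Claim_ definition above) =====
theorem to_source_lines_py_spec : Claim_equal_to_source_lines_py := by
  intro text _
  unfold Spec_to_source_lines_py
  rw [A_eq_g, B_eq_g]
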